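-- pv_equiv track=rewrite | github.com/Ignas12345/RT_cov_analysis | code/gene_body_coverage_rseq/get_max_poly_x_run_in_bins.py | calculate_poly_x_regions
-- ===== SOURCE A (Python) =====
-- def calculate_poly_x_regions(sequence, nucleotides = 'A', allow_mismatches_without_breaking_streak = 1):
--     """
--     Calculate the regions of consecutive nucleotides in a given sequence.
--
--     Parameters:
--     sequence (str): The input nucleotide sequence.
--     nucleotides (str): The nucleotide(s) to look for. Default is 'A'.
--     allow_mismatches_without_breaking_streak (int): Number of allowed mismatches within a streak. Default is 1.
--
--     Returns:
--     list of tuples: Each tuple contains the start and end indices of a region.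
--     """
--
--
--     regions = []
--     streak_lengths = []
--     start = None
--     mismatch_count = 0
--     streak_length = 0
--
--     for i, nucleotide in enumerate(sequence):
--         if nucleotide in nucleotides:
--             if start is None:
--                 start = i
--             mismatch_count = 0
--             streak_length += 1
--         else:
--             if start is not None:
--                 mismatch_count += 1
--                 if mismatch_count > allow_mismatches_without_breaking_streak:
--                     regions.append((start, i - mismatch_count))
--                     streak_lengths.append(streak_length)
--                     start = None
--                     mismatch_count = 0
--                     streak_length = 0
--
--     if start is not None:
--         regions.append((start, len(sequence) - 1))
--         streak_lengths.append(streak_length)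
--
--     return regions, streak_lengths
-- ===== SOURCE B (Python) =====
-- def calculate_poly_x_regions(sequence, nucleotides = 'A', allow_mismatches_without_breaking_streak = 1):
--     """Group the matching indices directly: one pass collects them, a second pass over
--     the (usually much shorter) index list splits it wherever the gap of mismatches
--     exceeds the allowance."""
--     allow = allow_mismatches_without_breaking_streak
--     matches = [i for i, c in enumerate(sequence) if c in nucleotides]
--     regions = []
--     streak_lengths = []
--     cur = None  # (start, count, prev_match)
--     for i in matches:
--         if cur is None:
--             cur = (i, 1, i)
--         else:
--             start, cnt, prev = cur
--             if i - prev > 1 and i - prev - 1 > allow: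
--                 regions.append((start, prev))
--                 streak_lengths.append(cnt)
--                 cur = (i, 1, i)
--             else:
--                 cur = (start, cnt + 1, i)
--     if cur is not None:
--         start, cnt, prev = cur
--         tail = len(sequence) - 1 - prev
--         if tail >= 1 and tail > allow:
--             regions.append((start, prev))
--         else:
--             regions.append((start, len(sequence) - 1))
--         streak_lengths.append(cnt)
--     return regions, streak_lengths
-- ===== Notes on version B (the rewrite author's own statement) =====
-- stated objective: alternative
-- what changed: B first collects the list of matching indices in one comprehension, then groups that index list by mismatch gaps (closing a region only at the next match or at the end), instead of A's per-character state machine with an eager close inside the scan.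
import Mathlib
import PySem

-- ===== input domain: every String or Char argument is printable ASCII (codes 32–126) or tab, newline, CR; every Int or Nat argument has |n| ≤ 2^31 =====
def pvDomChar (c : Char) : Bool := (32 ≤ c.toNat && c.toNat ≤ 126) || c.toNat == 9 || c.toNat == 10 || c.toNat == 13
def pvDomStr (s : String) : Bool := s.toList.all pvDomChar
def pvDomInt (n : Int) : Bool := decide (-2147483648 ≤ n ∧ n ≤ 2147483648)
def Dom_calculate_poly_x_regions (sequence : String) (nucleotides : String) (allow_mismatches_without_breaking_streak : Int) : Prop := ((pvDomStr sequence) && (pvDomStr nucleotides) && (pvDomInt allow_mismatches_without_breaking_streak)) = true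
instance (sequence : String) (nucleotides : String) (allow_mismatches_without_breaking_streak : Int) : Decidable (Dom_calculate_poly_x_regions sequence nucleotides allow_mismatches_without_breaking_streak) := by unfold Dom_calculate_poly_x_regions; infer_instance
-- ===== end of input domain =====

-- B groups the match indices directly (collect indices, then split on large gaps)
-- instead of A's char-by-char state machine; the objective is an alternative
-- decomposition, the return value is proved identical on all inputs.

-- ===== PORT A =====
-- `c in nucleotides` for a single character is character membership in the string
def pvInNucs (nucleotides : String) (c : Char) : Bool := nucleotides.toList.contains c

-- A's loop over `enumerate(sequence)` with state (regions, streak_lengths, start, mismatch_count, streak_length)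
def pvALoop (nucleotides : String) (allow n : Int) :
    List Char → Int → List (Int × Int) → List Int → Option Int → Int → Int →
    (List (Int × Int)) × List Int
  | [], _, regs, strs, start, _mc, sl =>
    match start with
    | some s => (regs ++ [(s, n - 1)], strs ++ [sl])
    | none => (regs, strs)
  | c :: cs, i, regs, strs, start, mc, sl =>
    if pvInNucs nucleotides c then
      pvALoop nucleotides allow n cs (i + 1) regs strs (some (start.getD i)) 0 (sl + 1)
    else
      match start with
      | none => pvALoop nucleotides allow n cs (i + 1) regs strs none mc sl
      | some s =>
        if mc + 1 > allow then
          pvALoop nucleotides allow n cs (i + 1) (regs ++ [(s, i - (mc + 1))]) (strs ++ [sl]) none 0 0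
        else
          pvALoop nucleotides allow n cs (i + 1) regs strs (some s) (mc + 1) sl

def calculate_poly_x_regions (sequence : String) (nucleotides : String) (allow_mismatches_without_breaking_streak : Int) : (List (Int × Int)) × List Int :=
  pvALoop nucleotides allow_mismatches_without_breaking_streak
    (sequence.toList.length : Int) sequence.toList 0 [] [] none 0 0

-- ===== PORT B =====
-- `[i for i, c in enumerate(sequence) if c in nucleotides]`
def pvMatchIdx (nucleotides : String) : List Char → Int → List Int
  | [], _ => []
  | c :: cs, i =>
    if pvInNucs nucleotides c then i :: pvMatchIdx nucleotides cs (i + 1)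
    else pvMatchIdx nucleotides cs (i + 1)

-- B's loop over the match indices with state (regions, streak_lengths, cur = (start, count, prev))
def pvBLoop (allow n : Int) :
    List Int → List (Int × Int) → List Int → Option (Int × Int × Int) →
    (List (Int × Int)) × List Int
  | [], regs, strs, cur =>
    match cur with
    | none => (regs, strs)
    | some (s, cnt, prev) =>
      let tail := n - 1 - prev
      if 1 ≤ tail ∧ allow < tail then (regs ++ [(s, prev)], strs ++ [cnt])
      else (regs ++ [(s, n - 1)], strs ++ [cnt])
  | i :: is, regs, strs, cur =>
    match cur with
    | none => pvBLoop allow n is regs strs (some (i, 1, i))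
    | some (s, cnt, prev) =>
      if 1 < i - prev ∧ allow < i - prev - 1 then
        pvBLoop allow n is (regs ++ [(s, prev)]) (strs ++ [cnt]) (some (i, 1, i))
      else
        pvBLoop allow n is regs strs (some (s, cnt + 1, i))

def calculate_poly_x_regions_alt (sequence : String) (nucleotides : String) (allow_mismatches_without_breaking_streak : Int) : (List (Int × Int)) × List Int :=
  pvBLoop allow_mismatches_without_breaking_streak (sequence.toList.length : Int)
    (pvMatchIdx nucleotides sequence.toList 0) [] [] none

-- ===== PRECONDITION & SPEC =====
def Spec_calculate_poly_x_regions (sequence : String) (nucleotides : String) (allow_mismatches_without_breaking_streak : Int) (out : (List (Int × Int)) × List Int) : Prop := out = calculate_poly_x_regions_alt sequence nucleotides allow_mismatches_without_breaking_streak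
instance (sequence : String) (nucleotides : String) (allow_mismatches_without_breaking_streak : Int) (out : (List (Int × Int)) × List Int) : Decidable (Spec_calculate_poly_x_regions sequence nucleotides allow_mismatches_without_breaking_streak out) := by unfold Spec_calculate_poly_x_regions; infer_instance

-- ===== CLAIM (what is proved, stated in full; the proofs are below) =====
def Claim_equal_calculate_poly_x_regions : Prop := ∀ (sequence : String) (nucleotides : String) (allow_mismatches_without_breaking_streak : Int), Dom_calculate_poly_x_regions sequence nucleotides allow_mismatches_without_breaking_streak → Spec_calculate_poly_x_regions sequence nucleotides allow_mismatches_without_breaking_streak (calculate_poly_x_regions sequence nucleotides allow_mismatches_without_breaking_streak)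

-- ===== LEMMAS AND PROOFS =====

-- The simultaneous invariant relating A's char-by-char state machine to B's
-- match-index grouping loop, for every suffix `cs` of the sequence starting at
-- absolute index `i` (with `n` the total length):
--  (1) both idle (A: start = none with mc = sl = 0; B: cur = none);
--  (2) both inside an open region: A's mismatch counter mc equals the distance
--      from B's last match `prev` to the current position, and the streak has
--      not broken (mc = 0 ∨ mc ≤ allow);
--  (3) A has already closed the region (s, prev) that B still holds open,
--      because the gap since `prev` already exceeds the allowance.
theorem pv_main (nucleotides : String) (allow n : Int) :
    ∀ (cs : List Char) (i : Int), i + (cs.length : Int) = n →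
    (∀ regs strs, pvALoop nucleotides allow n cs i regs strs none 0 0
        = pvBLoop allow n (pvMatchIdx nucleotides cs i) regs strs none) ∧
    (∀ regs strs s sl prev mc, mc = i - 1 - prev → 0 ≤ mc → (mc = 0 ∨ mc ≤ allow) →
        pvALoop nucleotides allow n cs i regs strs (some s) mc sl
        = pvBLoop allow n (pvMatchIdx nucleotides cs i) regs strs (some (s, sl, prev))) ∧
    (∀ regs strs s sl prev, prev ≤ i - 2 → allow < i - 1 - prev →
        pvALoop nucleotides allow n cs i (regs ++ [(s, prev)]) (strs ++ [sl]) none 0 0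
        = pvBLoop allow n (pvMatchIdx nucleotides cs i) regs strs (some (s, sl, prev))) := by
  intro cs
  induction cs with
  | nil =>
    intro i hn
    simp only [List.length_nil, Int.natCast_zero, add_zero] at hn
    subst hn
    refine ⟨?_, ?_, ?_⟩
    · intro regs strs
      simp [pvALoop, pvMatchIdx, pvBLoop]
    · intro regs strs s sl prev mc hmc h0 hle
      simp only [pvALoop, pvMatchIdx, pvBLoop]
      rw [if_neg]
      omega
    · intro regs strs s sl prev h2 hgt
      simp only [pvALoop, pvMatchIdx, pvBLoop]
      rw [if_pos]
      omega
  | cons c cs ih =>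
    intro i hn
    have hn' : (i + 1) + (cs.length : Int) = n := by
      simp only [List.length_cons] at hn; push_cast at hn ⊢; omega
    obtain ⟨ih1, ih2, ih3⟩ := ih (i + 1) hn'
    by_cases hc : pvInNucs nucleotides c
    · -- match at index i
      refine ⟨?_, ?_, ?_⟩
      · intro regs strs
        simp only [pvALoop, pvMatchIdx, hc, if_pos, Option.getD_none, pvBLoop]
        exact ih2 regs strs i 1 i 0 (by omega) (by omega) (Or.inl rfl)
      · intro regs strs s sl prev mc hmc h0 hle
        simp only [pvALoop, pvMatchIdx, hc, if_pos, Option.getD_some, pvBLoop]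
        rw [if_neg (by omega)]
        exact ih2 regs strs s (sl + 1) i 0 (by omega) (by omega) (Or.inl rfl)
      · intro regs strs s sl prev h2 hgt
        simp only [pvALoop, pvMatchIdx, hc, if_pos, Option.getD_none, pvBLoop]
        rw [if_pos (by omega)]
        exact ih2 (regs ++ [(s, prev)]) (strs ++ [sl]) i 1 i 0 (by omega) (by omega) (Or.inl rfl)
    · -- mismatch at index i
      refine ⟨?_, ?_, ?_⟩
      · intro regs strs
        simp only [pvALoop, pvMatchIdx, hc]
        exact ih1 regs strs
      · intro regs strs s sl prev mc hmc h0 hle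
        simp only [pvALoop, pvMatchIdx, hc]
        by_cases hbr : allow < mc + 1
        · rw [if_pos hbr]
          have hprev : i - (mc + 1) = prev := by omega
          rw [hprev]
          exact ih3 regs strs s sl prev (by omega) (by omega)
        · rw [if_neg hbr]
          exact ih2 regs strs s sl prev (mc + 1) (by omega) (by omega) (by omega)
      · intro regs strs s sl prev h2 hgt
        simp only [pvALoop, pvMatchIdx, hc]
        exact ih3 regs strs s sl prev (by omega) (by omega)

-- ===== VERDICT (by name: the statement is the Claim_ definition above) =====
theorem calculate_poly_x_regions_spec : Claim_equal_calculate_poly_x_regions := by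
  intro sequence nucleotides allow _hdom
  unfold Spec_calculate_poly_x_regions calculate_poly_x_regions calculate_poly_x_regions_alt
  exact (pv_main nucleotides allow (sequence.toList.length : Int) sequence.toList 0
    (by simp)).1 [] []
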